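-- pv_equiv track=rewrite | github.com/ZeMA-gGmbH/NoPE-PY | nope/helpers/path.py | patternIsValid
-- ===== SOURCE A (Python) =====
-- SPLITCHAR = '/'
--
-- MULTI_LEVEL_WILDCARD = '#'
--
-- def patternIsValid(str: str) -> bool:
--     """ Function to test if a pattern is valid
--
--     Args:
--         str (str): The pattern to test
--
--     Returns:
--         bool: The result.
--     """
--
--     if str == "":
--         return True
--
--     splitted = str.split(SPLITCHAR)
--     last_index = len(splitted) - 1
--
--     for idx, segment in enumerate(splitted):
--         if segment:
--             if segment == MULTI_LEVEL_WILDCARD: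
--                 return idx == last_index
--         else:
--             return False
--
--     return True
-- ===== SOURCE B (Python) =====
-- SPLITCHAR = '/'
--
-- MULTI_LEVEL_WILDCARD = '#'
--
-- def patternIsValid(str: str) -> bool:
--     # single left-to-right pass over the characters: no splitting, just a
--     # two-flag state machine (current segment empty? / exactly the wildcard?)
--     if str == "":
--         return True
--     empty, hashed = True, False
--     for c in str:
--         if c == SPLITCHAR:
--             if empty or hashed:
--                 return False
--             empty, hashed = True, False
--         else:
--             hashed = empty and c == MULTI_LEVEL_WILDCARD
--             empty = False
--     return not empty
-- ===== Notes on version B (the rewrite author's own statement) =====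
-- stated objective: alternative
-- what changed: Replaced A's split-into-segments plus indexed enumerate scan by a single left-to-right pass over the raw characters with a two-flag state machine (current segment empty? / exactly '#'?), never materialising the segment list.
import Mathlib
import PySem

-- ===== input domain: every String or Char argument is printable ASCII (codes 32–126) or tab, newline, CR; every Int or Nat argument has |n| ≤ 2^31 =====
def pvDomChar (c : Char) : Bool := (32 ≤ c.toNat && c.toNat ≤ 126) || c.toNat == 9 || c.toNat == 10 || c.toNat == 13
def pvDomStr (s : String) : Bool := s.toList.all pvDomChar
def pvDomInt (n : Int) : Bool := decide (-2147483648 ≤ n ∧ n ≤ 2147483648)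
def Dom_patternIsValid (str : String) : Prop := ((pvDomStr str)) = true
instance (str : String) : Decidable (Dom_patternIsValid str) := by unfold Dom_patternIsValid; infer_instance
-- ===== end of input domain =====

-- B replaces A's split-then-indexed-scan by a one-pass two-flag state machine over the raw characters (objective: alternative).

-- ===== PORT A =====
-- the enumerate loop of A: early returns preserved branch for branch
def patternIsValidLoop (segs : List String) (idx last : Int) : Bool :=
  match segs with
  | [] => true
  | s :: rest =>
    if s ≠ "" then
      if s == "#" then decide (idx = last)
      else patternIsValidLoop rest (idx + 1) last
    else false

def patternIsValid (str : String) : Bool :=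
  if str == "" then true
  else
    let splitted := (PySem.Str.split? str "/").getD []
    patternIsValidLoop splitted 0 ((splitted.length : Int) - 1)

-- ===== PORT B =====
-- the for-loop of Source B: state = (empty : current segment empty so far, hashed : current segment is exactly "#")
def patternIsValidAltLoop (cs : List Char) (empty hashed : Bool) : Bool :=
  match cs with
  | [] => !empty
  | c :: rest =>
    if c = '/' then
      if empty || hashed then false
      else patternIsValidAltLoop rest true false
    else patternIsValidAltLoop rest false (empty && decide (c = '#'))

def patternIsValid_alt (str : String) : Bool :=
  if str == "" then true
  else patternIsValidAltLoop str.toList true false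

-- ===== PRECONDITION & SPEC =====
def Spec_patternIsValid (str : String) (out : Bool) : Prop := out = patternIsValid_alt str
instance (str : String) (out : Bool) : Decidable (Spec_patternIsValid str out) := by unfold Spec_patternIsValid; infer_instance

-- ===== CLAIM (what is proved, stated in full; the proofs are below) =====
def Claim_equal_patternIsValid : Prop := ∀ (str : String), Dom_patternIsValid str → Spec_patternIsValid str (patternIsValid str)

-- ===== LEMMAS AND PROOFS =====

-- unfolding equations for the two loops (definitional)
theorem patternIsValidLoop_cons (s : String) (rest : List String) (idx last : Int) :
    patternIsValidLoop (s :: rest) idx last =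
      (if s ≠ "" then (if s == "#" then decide (idx = last) else patternIsValidLoop rest (idx + 1) last) else false) := rfl

theorem patternIsValidAltLoop_cons (c : Char) (rest : List Char) (empty hashed : Bool) :
    patternIsValidAltLoop (c :: rest) empty hashed =
      (if c = '/' then (if empty || hashed then false else patternIsValidAltLoop rest true false)
       else patternIsValidAltLoop rest false (empty && decide (c = '#'))) := rfl

-- a simple structural description of splitting on '/': (first segment, remaining segments)
def mySplit (cs : List Char) : List Char × List (List Char) :=
  match cs with
  | [] => ([], [])
  | c :: rest =>
    let p := mySplit rest
    if c = '/' then ([], p.1 :: p.2) else (c :: p.1, p.2)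

theorem go_eq_mySplit (fuel : Nat) (l cur : List Char) (acc : List (List Char))
    (h : l.length ≤ fuel) :
    PySem.Chars.splitOn.go ['/'] fuel l cur acc =
      acc.reverse ++ (cur.reverse ++ (mySplit l).1) :: (mySplit l).2 := by
  induction fuel generalizing l cur acc with
  | zero =>
    have : l = [] := by cases l <;> simp_all
    subst this
    simp [PySem.Chars.splitOn.go, mySplit]
  | succ fuel ih =>
    cases l with
    | nil => simp [PySem.Chars.splitOn.go, mySplit]
    | cons c rest =>
      by_cases hc : c = '/'
      · subst hc
        rw [show PySem.Chars.splitOn.go ['/'] (fuel+1) ('/' :: rest) cur acc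
              = PySem.Chars.splitOn.go ['/'] fuel rest [] (cur.reverse :: acc) by
            simp [PySem.Chars.splitOn.go, List.isPrefixOf]]
        rw [ih rest [] (cur.reverse :: acc) (by simpa using Nat.le_of_succ_le_succ (by simpa using h))]
        simp [mySplit]
      · rw [show PySem.Chars.splitOn.go ['/'] (fuel+1) (c :: rest) cur acc
              = PySem.Chars.splitOn.go ['/'] fuel rest (c :: cur) acc by
            simp [PySem.Chars.splitOn.go, List.isPrefixOf, show ('/' == c) = false by simp [Ne.symm hc]]]
        rw [ih rest (c :: cur) acc (by simpa using Nat.le_of_succ_le_succ (by simpa using h))]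
        simp [mySplit, hc]

theorem splitOn_eq_mySplit (cs : List Char) :
    PySem.Chars.splitOn cs ['/'] = (mySplit cs).1 :: (mySplit cs).2 := by
  unfold PySem.Chars.splitOn
  rw [go_eq_mySplit (cs.length + 1) cs [] [] (by omega)]
  simp

-- A's loop, last-index form, reduced to two global facts about the segment list
theorem patternIsValidLoop_eq (segs : List String) (idx : Int) :
    patternIsValidLoop segs idx (idx + segs.length - 1) =
      (!segs.contains "" && !(segs.dropLast.contains "#")) := by
  induction segs generalizing idx with
  | nil => simp [patternIsValidLoop]
  | cons s rest ih =>
    by_cases hs : s = ""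
    · subst hs; simp [patternIsValidLoop]
    · by_cases hh : s = "#"
      · subst hh
        cases rest with
        | nil => simp [patternIsValidLoop]
        | cons t ts => simp [patternIsValidLoop]; omega
      · have hstep : patternIsValidLoop (s :: rest) idx (idx + ((s :: rest).length : Int) - 1)
            = patternIsValidLoop rest (idx + 1) (idx + ((s :: rest).length : Int) - 1) := by
          rw [patternIsValidLoop_cons]
          simp [hs, hh]
        have h1 : idx + ((s :: rest).length : Int) - 1
            = (idx + 1) + ((rest).length : Int) - 1 := by simp; omega
        rw [hstep, h1, ih]
        cases rest with
        | nil => simp [hs]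
        | cons t ts =>
          have hh' : ¬ ("#" = s) := fun e => hh e.symm
          simp [hh', hs]

-- B's state machine, with a ghost 'cur' (the prefix of the current segment already
-- consumed) realising the two flags, equals the same two global facts
theorem altLoop_eq (cs cur : List Char) :
    patternIsValidAltLoop cs cur.isEmpty (decide (cur = ['#'])) =
      (!(((cur ++ (mySplit cs).1) :: (mySplit cs).2).contains ([] : List Char)) &&
       !((((cur ++ (mySplit cs).1) :: (mySplit cs).2).dropLast).contains ['#'])) := by
  induction cs generalizing cur with
  | nil =>
    cases cur <;> simp [patternIsValidAltLoop, mySplit]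
  | cons c rest ih =>
    by_cases hc : c = '/'
    · subst hc
      by_cases he : cur = []
      · subst he; simp [patternIsValidAltLoop_cons, mySplit]
      · by_cases hh : cur = ['#']
        · subst hh; simp [patternIsValidAltLoop_cons, mySplit]
        · have h1 : patternIsValidAltLoop ('/' :: rest) cur.isEmpty (decide (cur = ['#']))
              = patternIsValidAltLoop rest ([] : List Char).isEmpty (decide (([] : List Char) = ['#'])) := by
            rw [patternIsValidAltLoop_cons]
            simp [he, hh]
          rw [h1, ih ([] : List Char)]
          have hh' : ¬ (['#'] = cur) := fun e => hh e.symm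
          simp [mySplit, he, hh']
    · have h1 : patternIsValidAltLoop (c :: rest) cur.isEmpty (decide (cur = ['#']))
          = patternIsValidAltLoop rest (cur ++ [c]).isEmpty (decide ((cur ++ [c]) = ['#'])) := by
        rw [patternIsValidAltLoop_cons]
        have hflag : (cur.isEmpty && decide (c = '#')) = decide ((cur ++ [c]) = ['#']) := by
          cases cur with
          | nil => simp
          | cons d ds => cases ds <;> simp
        have hempty : ((cur ++ [c]).isEmpty) = false := by simp
        rw [hflag, hempty]
        simp [hc]
      rw [h1, ih (cur ++ [c])]
      simp [mySplit, hc]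

-- bridge from segments as char lists to segments as strings (A's side)
theorem contains_map_ofList (L : List (List Char)) (t : List Char) :
    (L.map String.ofList).contains (String.ofList t) = L.contains t := by
  have inj : Function.Injective String.ofList := fun a b e => by
    simpa using congrArg String.toList e
  simp [List.mem_map_of_injective inj]

-- ===== VERDICT (by name: the statement is the Claim_ definition above) =====
theorem patternIsValid_spec : Claim_equal_patternIsValid := by
  intro str _
  unfold Spec_patternIsValid patternIsValid patternIsValid_alt
  by_cases h : str = ""
  · simp [h]
  · simp only [h, beq_iff_eq, if_false]
    have hsplit : (PySem.Str.split? str "/").getD []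
        = (PySem.Chars.splitOn str.toList ['/']).map String.ofList := by
      simp [PySem.Str.split?, PySem.Chars.split?]
    rw [hsplit, splitOn_eq_mySplit]
    rw [show (((((mySplit str.toList).1 :: (mySplit str.toList).2).map String.ofList).length : Int)) - 1
          = 0 + ((((mySplit str.toList).1 :: (mySplit str.toList).2).map String.ofList).length : Int) - 1 by ring]
    rw [patternIsValidLoop_eq (((mySplit str.toList).1 :: (mySplit str.toList).2).map String.ofList) 0]
    have hB := altLoop_eq str.toList []
    rw [show (([] : List Char).isEmpty) = true from rfl,
        show (decide (([] : List Char) = ['#'])) = false from rfl,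
        List.nil_append] at hB
    rw [hB]
    have e1 : ((((mySplit str.toList).1 :: (mySplit str.toList).2).map String.ofList).contains "")
        = (((mySplit str.toList).1 :: (mySplit str.toList).2).contains ([] : List Char)) := by
      exact contains_map_ofList ((mySplit str.toList).1 :: (mySplit str.toList).2) []
    have e2 : (((((mySplit str.toList).1 :: (mySplit str.toList).2).map String.ofList).dropLast).contains "#")
        = (((((mySplit str.toList).1 :: (mySplit str.toList).2)).dropLast).contains ['#']) := by
      rw [← List.map_dropLast]
      exact contains_map_ofList (((mySplit str.toList).1 :: (mySplit str.toList).2).dropLast) ['#']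
    rw [e1, e2]
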